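-- pv_equiv track=rewrite | github.com/BARarch/My-Hackerranks | getaways/EmmasComputerPluses181021.py | right_mask
-- ===== SOURCE A (Python) =====
-- def right_mask(r, c, n):
--     ## r rows of n 0s followed bu c - n 1s
--     if n >= c:
--         return 0
--     val = 0
--     num = (2 ** (c - n)) - 1
--     for _ in range(r):
--         val <<= c
--         val |= num
--     return val
-- ===== SOURCE B (Python) =====
-- def right_mask(r, c, n):
--     """r rows of n zeros followed by c - n ones, concatenated into one bitmask."""
--     if n >= c or r <= 0:
--         return 0
--     block = (1 << (c - n)) - 1
--     # sum of block * (2**c)**i for i in range(r), as one exact repunit division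
--     repunit = ((1 << (r * c)) - 1) // ((1 << c) - 1)
--     return block * repunit
-- ===== Notes on version B (the rewrite author's own statement) =====
-- stated objective: alternative
-- what changed: A builds the mask with r shift-or loop iterations; B computes it in closed form as the one-row block (2^(c-n)-1) times the repunit ((1<<(r*c))-1)//((1<<c)-1), with no loop; Pre_ excludes negative n with n < c and r >= 1, where the per-row block is wider than a row so A either raises (c < 0, negative shift) or ORs overlapping blocks, an accidental value no caller of this row pattern would specify.
-- outside the precondition, e.g. on right_mask(2, 2, -1): A returns 31, B returns 35
import Mathlib
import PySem

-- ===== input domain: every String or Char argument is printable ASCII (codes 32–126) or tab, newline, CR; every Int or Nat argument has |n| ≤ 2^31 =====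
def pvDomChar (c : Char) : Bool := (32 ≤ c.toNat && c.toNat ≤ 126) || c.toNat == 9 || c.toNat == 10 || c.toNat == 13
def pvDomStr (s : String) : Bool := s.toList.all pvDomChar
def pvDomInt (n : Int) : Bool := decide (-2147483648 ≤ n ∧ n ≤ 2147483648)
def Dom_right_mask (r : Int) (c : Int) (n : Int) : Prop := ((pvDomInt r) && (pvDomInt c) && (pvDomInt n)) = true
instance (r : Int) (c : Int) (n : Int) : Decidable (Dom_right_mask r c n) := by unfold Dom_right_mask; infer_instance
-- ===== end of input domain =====

-- B replaces A's r-step shift/or loop by a loop-free closed form (block times repunit); objective: alternative.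

-- ===== PORT A =====
def right_mask (r : Int) (c : Int) (n : Int) : Int :=
  if n ≥ c then 0
  else
    -- num = 2 ** (c - n) - 1 ; here n < c, so the exponent c - n ≥ 1 and .toNat is exact
    let num : Int := 2 ^ (c - n).toNat - 1
    -- for _ in range(r): val <<= c; val |= num ; inside Pre_ we have c ≥ 0, so c.toNat is exact
    (List.range r.toNat).foldl (fun val _ => PySem.Int.bor (val <<< c.toNat) num) 0

-- ===== PORT B =====
def right_mask_alt (r : Int) (c : Int) (n : Int) : Int :=
  if n ≥ c ∨ r ≤ 0 then 0
  else
    -- block = (1 << (c-n)) - 1; repunit = ((1 << (r*c)) - 1) // ((1 << c) - 1)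
    -- inside Pre_ the live exponents are nonnegative, so .toNat is exact
    (((1 : Int) <<< (c - n).toNat) - 1) *
      PySem.Int.floordiv (((1 : Int) <<< (r * c).toNat) - 1) (((1 : Int) <<< c.toNat) - 1)

-- ===== PRECONDITION & SPEC =====
-- Pre_ excludes negative n with n < c and r ≥ 1: there the per-row block is wider than a
-- row, so A either raises ValueError (c < 0: negative shift) or ORs overlapping blocks,
-- an accidental value for this row pattern; on all other inputs A returns normally.
def Pre_right_mask (r : Int) (c : Int) (n : Int) : Prop := 0 ≤ n ∨ c ≤ n ∨ r ≤ 0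
instance (r : Int) (c : Int) (n : Int) : Decidable (Pre_right_mask r c n) := by
  unfold Pre_right_mask; infer_instance
def pvWitness_right_mask : Int × Int × Int := (3, 4, 2)

def Spec_right_mask (r : Int) (c : Int) (n : Int) (out : Int) : Prop := out = right_mask_alt r c n
instance (r : Int) (c : Int) (n : Int) (out : Int) : Decidable (Spec_right_mask r c n out) := by
  unfold Spec_right_mask; infer_instance

-- ===== CLAIM (what is proved, stated in full; the proofs are below) =====
def Claim_equal_right_mask : Prop := ∀ (r : Int) (c : Int) (n : Int),
  Dom_right_mask r c n → Pre_right_mask r c n → Spec_right_mask r c n (right_mask r c n)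

-- ===== LEMMAS AND PROOFS =====

-- Nat model of A's loop: k iterations of (val <<< cN) ||| num starting from 0.
def pvRep (num cN : Nat) : Nat → Nat
  | 0 => 0
  | k + 1 => (pvRep num cN k <<< cN) ||| num

-- Nat model of the block-position geometric sum: pvS cN k = Σ_{i<k} (2^cN)^i.
def pvS (cN : Nat) : Nat → Nat
  | 0 => 0
  | k + 1 => pvS cN k * 2 ^ cN + 1

theorem pvRep_foldl (num cN : Nat) (k : Nat) :
    (List.range k).foldl (fun val _ => PySem.Int.bor (val <<< cN) ((num : Nat) : Int)) 0
      = ((pvRep num cN k : Nat) : Int) := by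
  induction k with
  | zero => simp [pvRep]
  | succ k ih =>
      rw [List.range_succ, List.foldl_append, ih]
      simp [pvRep, ← Int.natCast_shiftLeft, PySem.Int.bor_natCast]

theorem pvRep_eq_mul (w cN k : Nat) (h : w ≤ cN) :
    pvRep (2 ^ w - 1) cN k = (2 ^ w - 1) * pvS cN k := by
  induction k with
  | zero => simp [pvRep, pvS]
  | succ k ih =>
      have hlt : 2 ^ w - 1 < 2 ^ cN := by
        have := Nat.pow_le_pow_right (by norm_num : 1 ≤ 2) h
        have := Nat.one_le_two_pow (n := w)
        omega
      rw [pvRep, ih, ← Nat.shiftLeft_add_eq_or_of_lt hlt, Nat.shiftLeft_eq, pvS]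
      ring

theorem pvS_mul (cN k : Nat) : (2 ^ cN - 1) * pvS cN k = 2 ^ (k * cN) - 1 := by
  induction k with
  | zero => simp [pvS]
  | succ k ih =>
      have h1 : 1 ≤ 2 ^ (k * cN) := Nat.one_le_two_pow
      have h2 : 1 ≤ 2 ^ cN := Nat.one_le_two_pow
      have hpow : 2 ^ ((k + 1) * cN) = 2 ^ (k * cN) * 2 ^ cN := by
        rw [← pow_add]; ring_nf
      have : (2 ^ cN - 1) * pvS cN (k + 1)
          = ((2 ^ cN - 1) * pvS cN k) * 2 ^ cN + (2 ^ cN - 1) := by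
        rw [pvS]; ring
      rw [this, ih, hpow, Nat.sub_mul]
      have hle : 1 * 2 ^ cN ≤ 2 ^ (k * cN) * 2 ^ cN :=
        Nat.mul_le_mul_right _ h1
      omega

theorem right_mask_spec : Claim_equal_right_mask := by
  intro r c n _ hpre
  unfold Spec_right_mask right_mask right_mask_alt
  by_cases hnc : n ≥ c
  · simp [hnc]
  · by_cases hr : r ≤ 0
    · have : r.toNat = 0 := by omega
      simp [hnc, hr, this]
    · have hn0 : 0 ≤ n := by
        rcases hpre with h | h | h <;> omega
      have hn : n < c := by omega
      have hc : 0 < c := by omega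
      have hcond : ¬ (n ≥ c ∨ r ≤ 0) := by omega
      rw [if_neg hnc, if_neg hcond]
      set k := r.toNat with hk
      set cN := c.toNat with hcN
      set wN := (c - n).toNat with hwN
      have hk1 : 1 ≤ k := by omega
      have hcC : (cN : Int) = c := Int.toNat_of_nonneg (by omega)
      have hwC : (wN : Int) = c - n := Int.toNat_of_nonneg (by omega)
      have hkC : (k : Int) = r := Int.toNat_of_nonneg (by omega)
      have hnum : (2 ^ wN - 1 : Int) = ((2 ^ wN - 1 : Nat) : Int) := by
        have : 1 ≤ 2 ^ wN := Nat.one_le_two_pow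
        push_cast [this]; ring
      rw [hnum, pvRep_foldl (2 ^ wN - 1) cN k]
      have hwc : wN ≤ cN := by omega
      have hc1 : 1 ≤ cN := by omega
      have hexp : (r * c).toNat = k * cN := by
        have : r * c = ((k * cN : Nat) : Int) := by push_cast; rw [hcC, hkC]
        rw [this, Int.toNat_natCast]
      have hne : (2 : Int) ^ cN - 1 ≠ 0 := by
        have : (2 : Int) ^ 1 ≤ 2 ^ cN := pow_le_pow_right₀ (by norm_num) hc1
        simp at this; omega
      have hrepunit : ((2 : Int) ^ (k * cN)) - 1
          = ((2 : Int) ^ cN - 1) * ((pvS cN k : Nat) : Int) := by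
        have hS := pvS_mul cN k
        have h1 : 1 ≤ 2 ^ (k * cN) := Nat.one_le_two_pow
        have h2 : (1 : Nat) ≤ 2 ^ cN := Nat.one_le_two_pow
        have := congrArg (fun m : Nat => (m : Int)) hS
        push_cast [h1, h2] at this
        omega
      rw [hexp]
      simp only [Int.shiftLeft_eq, one_mul]
      rw [hrepunit, PySem.Int.floordiv, Int.mul_fdiv_cancel_left _ hne]
      rw [pvRep_eq_mul wN cN k hwc]
      have h1 : 1 ≤ 2 ^ wN := Nat.one_le_two_pow
      push_cast [h1]; ring
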